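-- pv_equiv track=rewrite | github.com/SV-stark/PDFbull | packages/micropdf/scripts/generate_headers.py | convert_rust_type_to_c
-- ===== SOURCE A (Python) =====
-- TYPE_MAP = {
--     'i32': 'int32_t',
--     'u32': 'uint32_t',
--     'i64': 'int64_t',
--     'u64': 'uint64_t',
--     'f32': 'float',
--     'f64': 'double',
--     'bool': 'bool',
--     'usize': 'size_t',
--     'isize': 'intptr_t',
--     '()': 'void',
--     'c_char': 'char',
--     'c_int': 'int',
--     'c_void': 'void',
--     'c_float': 'float',
--     'c_double': 'double',
-- }
--
-- def convert_rust_type_to_c(rust_type: str) -> str: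
--     """Convert a Rust type to its C equivalent."""
--     rust_type = rust_type.strip()
--
--     # Handle simple types
--     if rust_type in TYPE_MAP:
--         return TYPE_MAP[rust_type]
--
--     # Handle pointers (including nested paths like std::ffi::c_char)
--     # Process nested pointers recursively
--     if rust_type.startswith('*const '):
--         inner = rust_type[7:].strip()
--         # Clean up fully qualified paths before recursing
--         if '::' in inner and not inner.startswith('*'):
--             inner = inner.split('::')[-1]
--         # Map c_char to char before recursing
--         if inner == 'c_char':
--             inner = 'char'
--         # Recursively convert the inner type (handles nested pointers)
--         inner_c = convert_rust_type_to_c(inner)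
--         # Special case for char pointers
--         if inner_c == 'char':
--             return 'const char *'
--         return f'{inner_c} const *'
--
--     if rust_type.startswith('*mut '):
--         inner = rust_type[5:].strip()
--         # Recursively convert the inner type (handles nested pointers)
--         inner_c = convert_rust_type_to_c(inner)
--         return f'{inner_c} *'
--
--     # Handle Handle types
--     if 'Handle' in rust_type:
--         return 'int32_t'
--
--     # Handle struct types (fz_*, pdf_*)
--     if rust_type.startswith(('fz_', 'pdf_')):
--         return rust_type
--
--     # Clean up fully qualified paths
--     if '::' in rust_type:
--         return rust_type.split('::')[-1]
--
--     # Default: return as-is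
--     return rust_type
-- ===== SOURCE B (Python) =====
-- _C_TYPES = {
--     'i32': 'int32_t',
--     'u32': 'uint32_t',
--     'i64': 'int64_t',
--     'u64': 'uint64_t',
--     'f32': 'float',
--     'f64': 'double',
--     'bool': 'bool',
--     'usize': 'size_t',
--     'isize': 'intptr_t',
--     '()': 'void',
--     'c_char': 'char',
--     'c_int': 'int',
--     'c_void': 'void',
--     'c_float': 'float',
--     'c_double': 'double',
-- }
--
--
-- def _base_to_c(s):
--     """Convert a pointer-free Rust base type to C."""
--     c = _C_TYPES.get(s)
--     if c is not None:
--         return c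
--     if 'Handle' in s:
--         return 'int32_t'
--     if s.startswith('fz_'):
--         return s
--     if s.startswith('pdf_'):
--         return s
--     if '::' in s:
--         return s.split('::')[-1]
--     return s
--
--
-- def convert_rust_type_to_c(rust_type: str) -> str:
--     """Convert a Rust type to its C equivalent (iterative peel + suffix join)."""
--     s = rust_type
--     flags = []
--     while True:
--         s = s.strip()
--         if s.startswith('*const '):
--             t = s[7:].strip()
--             if '::' in t and not t.startswith('*'):
--                 t = t.split('::')[-1]
--             if t == 'c_char':
--                 t = 'char'
--             flags.append(True)
--             s = t
--         elif s.startswith('*mut '):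
--             flags.append(False)
--             s = s[5:].strip()
--         else:
--             break
--     out = _base_to_c(s)
--     if not flags:
--         return out
--     inner = flags[-1]
--     if inner:
--         head = 'const char *' if out == 'char' else out + ' const *'
--     else:
--         head = out + ' *'
--     return head + ''.join(' const *' if f else ' *' for f in reversed(flags[:-1]))
-- ===== Notes on version B (the rewrite author's own statement) =====
-- stated objective: alternative
-- what changed: Replaces A's self-recursion on pointer types with an iterative peel that strips the const/mut pointer prefixes while collecting a flag list, converts the base type once via a plain table scan, then builds the result as an explicit head (from the innermost layer) plus one joined string of per-layer pointer suffixes instead of layer-by-layer wrapping.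
import Mathlib
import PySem

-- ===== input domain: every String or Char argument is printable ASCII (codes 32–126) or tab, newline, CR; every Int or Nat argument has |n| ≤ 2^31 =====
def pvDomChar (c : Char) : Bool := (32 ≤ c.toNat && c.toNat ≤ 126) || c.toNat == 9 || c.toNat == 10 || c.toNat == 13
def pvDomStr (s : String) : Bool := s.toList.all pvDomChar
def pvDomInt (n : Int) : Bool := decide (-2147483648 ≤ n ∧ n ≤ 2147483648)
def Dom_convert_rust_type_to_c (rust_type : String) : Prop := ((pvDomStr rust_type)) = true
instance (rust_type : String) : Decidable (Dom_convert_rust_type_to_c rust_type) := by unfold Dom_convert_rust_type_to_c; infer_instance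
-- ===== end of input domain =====

-- B replaces A's self-recursion with an iterative pointer-prefix peel plus a suffix-join rebuild of the result.

-- ===== PORT A =====
-- module-level TYPE_MAP as used by A
def TYPE_MAP : PySem.Dict (List Char) (List Char) := PySem.Dict.mk [
  ("i32".toList, "int32_t".toList),
  ("u32".toList, "uint32_t".toList),
  ("i64".toList, "int64_t".toList),
  ("u64".toList, "uint64_t".toList),
  ("f32".toList, "float".toList),
  ("f64".toList, "double".toList),
  ("bool".toList, "bool".toList),
  ("usize".toList, "size_t".toList),
  ("isize".toList, "intptr_t".toList),
  ("()".toList, "void".toList),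
  ("c_char".toList, "char".toList),
  ("c_int".toList, "int".toList),
  ("c_void".toList, "void".toList),
  ("c_float".toList, "float".toList),
  ("c_double".toList, "double".toList)]

-- s.split('::')[-1]  (split with a nonempty separator is never empty, so [-1] never raises)
def lastPiece (cs : List Char) : List Char :=
  (PySem.List.pyGet? (PySem.Chars.splitOn cs "::".toList) (-1)).getD []

-- A's const-pointer layer cleanup: strip rust_type[7:], collapse a '::' path unless the inner
-- type is itself a pointer, map c_char to char
def constInner (t : List Char) : List Char :=
  let inner := PySem.Chars.strip (t.drop 7)
  let inner := if PySem.Chars.isIn "::".toList inner && !(PySem.Chars.startswith inner "*".toList)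
               then lastPiece inner else inner
  if inner == "c_char".toList then "char".toList else inner

-- A's trailing chain after the TYPE_MAP hit and the pointer branches: Handle / fz_,pdf_ / '::' / as-is
def aTail (t : List Char) : List Char :=
  if PySem.Chars.isIn "Handle".toList t then "int32_t".toList
  else if PySem.Chars.startswith t "fz_".toList || PySem.Chars.startswith t "pdf_".toList then t
  else if PySem.Chars.isIn "::".toList t then lastPiece t
  else t

-- TYPE_MAP lookup then the trailing chain
def baseConv (t : List Char) : List Char :=
  match TYPE_MAP.get? t with
  | some v => v
  | none => aTail t

-- A's recursion, fuel-guarded: each recursive call drops a 7- or 5-char prefix (strip/split never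
-- lengthen), so fuel = length + 1 is never exhausted; the fuel-0 branch only skips the (then
-- impossible) pointer branches.
def aGo : Nat → List Char → List Char
  | 0, s => baseConv (PySem.Chars.strip s)
  | f + 1, s =>
    let t := PySem.Chars.strip s
    match TYPE_MAP.get? t with
    | some v => v
    | none =>
      if PySem.Chars.startswith t "*const ".toList then
        let innerC := aGo f (constInner t)
        if innerC == "char".toList then "const char *".toList else innerC ++ " const *".toList
      else if PySem.Chars.startswith t "*mut ".toList then
        aGo f (PySem.Chars.strip (t.drop 5)) ++ " *".toList
      else aTail t

def convert_rust_type_to_c (rust_type : String) : String :=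
  String.ofList (aGo (rust_type.toList.length + 1) rust_type.toList)

-- ===== PORT B =====
-- Source B's own _C_TYPES.get(s): first match in the literal table (keys are distinct)
def bTable : List (List Char × List Char) := [
  ("i32".toList, "int32_t".toList), ("u32".toList, "uint32_t".toList),
  ("i64".toList, "int64_t".toList), ("u64".toList, "uint64_t".toList),
  ("f32".toList, "float".toList), ("f64".toList, "double".toList),
  ("bool".toList, "bool".toList), ("usize".toList, "size_t".toList),
  ("isize".toList, "intptr_t".toList), ("()".toList, "void".toList),
  ("c_char".toList, "char".toList), ("c_int".toList, "int".toList),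
  ("c_void".toList, "void".toList), ("c_float".toList, "float".toList),
  ("c_double".toList, "double".toList)]

-- Source B's _C_TYPES.get(s): first matching entry of the table (keys are distinct)
def bTypeMap (t : List Char) : Option (List Char) :=
  (bTable.find? (fun p => p.1 == t)).map (fun p => p.2)

-- Source B's s.split('::')[-1] written as the last element of the split
def bLast (cs : List Char) : List Char :=
  (PySem.Chars.splitOn cs "::".toList).getLastD []

-- Source B's _base_to_c
def bBase (s : List Char) : List Char :=
  match bTypeMap s with
  | some c => c
  | none =>
    if PySem.Chars.isIn "Handle".toList s then "int32_t".toList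
    else if PySem.Chars.startswith s "fz_".toList then s
    else if PySem.Chars.startswith s "pdf_".toList then s
    else if PySem.Chars.isIn "::".toList s then bLast s
    else s

-- one layer's pointer suffix (' const *' for a const layer, ' *' for a mut layer)
def bSuffix (f : Bool) : List Char := if f then " const *".toList else " *".toList

-- Source B's while loop: strip, then peel one const/mut pointer prefix per round, appending a flag;
-- fuel = length + 1 as for aGo (each round shortens the string)
def bPeel : Nat → List Char → List Bool → List Bool × List Char
  | 0, s, fl => (fl, PySem.Chars.strip s)
  | f + 1, s0, fl =>
    let s := PySem.Chars.strip s0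
    if PySem.Chars.startswith s "*const ".toList then
      let t := PySem.Chars.strip (s.drop 7)
      let t := if PySem.Chars.isIn "::".toList t && !(PySem.Chars.startswith t "*".toList)
               then bLast t else t
      let t := if t == "c_char".toList then "char".toList else t
      bPeel f t (fl ++ [true])
    else if PySem.Chars.startswith s "*mut ".toList then
      bPeel f (PySem.Chars.strip (s.drop 5)) (fl ++ [false])
    else (fl, s)

-- Source B's tail: head from the innermost flag (flags[-1]), then the joined suffixes of the rest
def bWrap (fl : List Bool) (out : List Char) : List Char :=
  match fl.getLast? with
  | none => out
  | some inner =>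
    let head := if inner then
                  (if out == "char".toList then "const char *".toList else out ++ " const *".toList)
                else out ++ " *".toList
    head ++ (fl.dropLast.reverse.map bSuffix).flatten

def convert_rust_type_to_c_alt (rust_type : String) : String :=
  String.ofList (bWrap (bPeel (rust_type.toList.length + 1) rust_type.toList []).1
                       (bBase (bPeel (rust_type.toList.length + 1) rust_type.toList []).2))

-- ===== PRECONDITION & SPEC =====
def Spec_convert_rust_type_to_c (rust_type : String) (out : String) : Prop := out = convert_rust_type_to_c_alt rust_type
instance (rust_type : String) (out : String) : Decidable (Spec_convert_rust_type_to_c rust_type out) := by unfold Spec_convert_rust_type_to_c; infer_instance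

-- ===== CLAIM =====
def Claim_equal_convert_rust_type_to_c : Prop := ∀ (rust_type : String), Dom_convert_rust_type_to_c rust_type → Spec_convert_rust_type_to_c rust_type (convert_rust_type_to_c rust_type)

-- ===== LEMMAS AND PROOFS =====

-- A's pyGet?(-1) and B's getLastD compute the same last piece
theorem lastPiece_eq (cs : List Char) : lastPiece cs = bLast cs := by
  simp [lastPiece, bLast, PySem.List.pyGet?_neg_one, List.getLastD_eq_getLast?]

-- B's find?-table lookup is A's Dict lookup
theorem bTypeMap_eq (t : List Char) : bTypeMap t = TYPE_MAP.get? t := by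
  simp [bTypeMap, bTable, TYPE_MAP, PySem.Dict.get?, List.find?]

-- B's base conversion is A's (same chain, separate fz_/pdf_ tests, bLast for lastPiece)
theorem bBase_eq (t : List Char) : bBase t = baseConv t := by
  unfold bBase baseConv aTail
  rw [bTypeMap_eq]
  cases TYPE_MAP.get? t with
  | some v => rfl
  | none => rw [← lastPiece_eq]; split_ifs <;> simp_all

-- no key of TYPE_MAP starts with '*', so a '*'-headed string is never a TYPE_MAP hit
theorem typeMap_get?_star (t : List Char) (r : List Char) (h : t = '*' :: r) :
    TYPE_MAP.get? t = none := by
  subst h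
  simp [TYPE_MAP, PySem.Dict.get?, List.find?]

-- the flag accumulator of bPeel is a prefix of the result
theorem bPeel_acc (f : Nat) (s : List Char) (fl : List Bool) :
    bPeel f s fl = (fl ++ (bPeel f s []).1, (bPeel f s []).2) := by
  induction f generalizing s fl with
  | zero => simp [bPeel]
  | succ f ih =>
    simp only [bPeel]
    split_ifs <;> simp only [List.nil_append] <;>
      try (rw [ih]; conv_rhs => rw [ih])
    all_goals simp [List.append_assoc]

-- proof-side single wrapping step (A's post-recursion line for each layer)
def bStep (out : List Char) (isConst : Bool) : List Char :=
  if isConst then (if out == "char".toList then "const char *".toList else out ++ " const *".toList)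
  else out ++ " *".toList

-- once the running text ends in '*' it is never 'char' again, so each further step just appends
theorem foldl_bStep_star (l : List Bool) (out : List Char) (h : out.getLast? = some '*') :
    l.foldl bStep out = out ++ (l.map bSuffix).flatten := by
  induction l generalizing out with
  | nil => simp
  | cons g l ih =>
    have hne : (out == "char".toList) = false := by
      apply beq_eq_false_iff_ne.mpr
      intro he
      rw [he] at h
      exact absurd h (by decide)
    have hstep : bStep out g = out ++ bSuffix g := by
      cases g
      · rfl
      · simp only [bStep, bSuffix, hne, Bool.false_eq_true, if_false, if_true]
    have hlast : (out ++ bSuffix g).getLast? = some '*' := by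
      cases g <;> simp [bSuffix, List.getLast?_append]
    simp only [List.foldl_cons, hstep, ih _ hlast, List.map_cons, List.flatten_cons,
      List.append_assoc]

-- A's layer-by-layer wrapping (foldl over the reversed flags) equals B's head + joined suffixes
theorem bWrap_eq_foldl (fl : List Bool) (out : List Char) :
    fl.reverse.foldl bStep out = bWrap fl out := by
  rcases h : fl.getLast? with _ | inner
  · rw [List.getLast?_eq_none_iff] at h
    simp [h, bWrap]
  · have hfl : fl = fl.dropLast ++ [inner] := by
      conv_lhs => rw [← List.dropLast_append_getLast? inner h]
    rw [hfl]
    simp only [List.reverse_append, List.reverse_cons, List.reverse_nil, List.nil_append,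
      List.singleton_append, List.foldl_cons, bWrap, List.dropLast_concat, List.getLast?_concat]
    have hstar : ∀ g : Bool, (bStep out g).getLast? = some '*' := by
      intro g
      cases g
      · simp [bStep, List.getLast?_append]
      · simp [bStep, List.getLast?_append]
        split_ifs <;> simp
    rw [foldl_bStep_star _ _ (hstar inner)]
    cases inner <;> simp [bStep]

-- the core equivalence: A's recursion equals B's peel, for every fuel
theorem aGo_eq_bPeel (f : Nat) (s : List Char) :
    aGo f s = (bPeel f s []).1.reverse.foldl bStep (baseConv (bPeel f s []).2) := by
  induction f generalizing s with
  | zero => simp [aGo, bPeel]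
  | succ f ih =>
    by_cases hc : PySem.Chars.startswith (PySem.Chars.strip s) "*const ".toList = true
    · obtain ⟨r, hr⟩ := ((PySem.Chars.startswith_iff _ _).mp hc)
      have hm : TYPE_MAP.get? (PySem.Chars.strip s) = none :=
        typeMap_get?_star _ ('c' :: 'o' :: 'n' :: 's' :: 't' :: ' ' :: r) (by rw [← hr]; rfl)
      simp only [aGo, bPeel, hm, hc, if_true, List.nil_append, constInner, lastPiece_eq]
      rw [bPeel_acc]
      simp only [List.reverse_append, List.reverse_cons, List.reverse_nil, List.nil_append,
        List.foldl_append, List.foldl_cons, List.foldl_nil]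
      rw [← ih]
      simp [bStep]
    · by_cases hmu : PySem.Chars.startswith (PySem.Chars.strip s) "*mut ".toList = true
      · obtain ⟨r, hr⟩ := ((PySem.Chars.startswith_iff _ _).mp hmu)
        have hm : TYPE_MAP.get? (PySem.Chars.strip s) = none :=
          typeMap_get?_star _ ('m' :: 'u' :: 't' :: ' ' :: r) (by rw [← hr]; rfl)
        simp only [aGo, bPeel, hm, hc, hmu, Bool.false_eq_true, if_false, if_true, List.nil_append]
        rw [bPeel_acc]
        simp only [List.reverse_append, List.reverse_cons, List.reverse_nil, List.nil_append,
          List.foldl_append, List.foldl_cons, List.foldl_nil]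
        rw [← ih]
        simp [bStep]
      · simp only [aGo, bPeel, hc, hmu, Bool.false_eq_true, if_false, List.reverse_nil,
          List.foldl_nil, baseConv]

-- ===== VERDICT =====
theorem convert_rust_type_to_c_spec : Claim_equal_convert_rust_type_to_c := by
  intro rt _
  unfold Spec_convert_rust_type_to_c convert_rust_type_to_c convert_rust_type_to_c_alt
  rw [aGo_eq_bPeel, bWrap_eq_foldl, bBase_eq]
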